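-- pv_equiv track=rewrite | github.com/hermafr/drugs | multiclass_ngram_naive_bayes.py | simple_concatenation
-- ===== SOURCE A (Python) =====
-- def simple_concatenation(words, spans):
--     new_words = []
--     new_spans = []
--     for i in range(len(words)):
--         if len(new_spans) == 0:
--             new_words.append(words[i])
--             new_spans.append(spans[i])
--         else:
--             if spans[i][0][0] == new_spans[-1][0][1] + 1:
--                 new_words[-1] = new_words[-1] + " " + words[i]
--                 new_spans[-1][0] = (new_spans[-1][0][0], spans[i][0][1])
--             else:
--                 new_words.append(words[i])
--                 new_spans.append(spans[i])
--     return new_words, new_spans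
-- ===== SOURCE B (Python) =====
-- def simple_concatenation(words, spans):
--     # Group-based rewrite: find each contiguous run [k, j) in one inner scan,
--     # join its words with ' '.join, and (like the original) mutate spans[k][0]
--     # in place when the run has more than one element.
--     n = len(words)
--     new_words = []
--     new_spans = []
--     k = 0
--     while k < n:
--         j = k + 1
--         while j < n and spans[j][0][0] == spans[j - 1][0][1] + 1:
--             j += 1
--         new_words.append(" ".join(words[k:j]))
--         if j - k > 1:
--             spans[k][0] = (spans[k][0][0], spans[j - 1][0][1])
--         new_spans.append(spans[k])
--         k = j
--     return new_words, new_spans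
-- ===== Notes on version B (the rewrite author's own statement) =====
-- stated objective: alternative
-- what changed: Replaces the single pass that repeatedly rewrites the last output entry (string re-concatenation and span re-assignment on every merge) by a two-level run-finding loop: an inner scan locates each contiguous run, the run's words are joined once with ' '.join and its span is written once.
import Mathlib
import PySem

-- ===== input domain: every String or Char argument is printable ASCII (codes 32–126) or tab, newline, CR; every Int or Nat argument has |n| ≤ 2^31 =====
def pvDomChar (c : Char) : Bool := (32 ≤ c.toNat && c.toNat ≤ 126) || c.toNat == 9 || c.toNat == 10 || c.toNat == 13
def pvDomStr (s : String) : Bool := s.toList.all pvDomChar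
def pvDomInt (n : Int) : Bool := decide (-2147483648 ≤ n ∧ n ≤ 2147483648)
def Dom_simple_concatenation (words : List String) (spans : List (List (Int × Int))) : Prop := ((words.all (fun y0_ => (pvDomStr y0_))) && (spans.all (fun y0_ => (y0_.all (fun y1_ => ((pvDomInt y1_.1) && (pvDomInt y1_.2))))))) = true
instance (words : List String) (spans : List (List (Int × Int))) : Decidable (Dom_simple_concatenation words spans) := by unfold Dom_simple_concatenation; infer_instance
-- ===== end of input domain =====

-- B replaces A's single pass (which rewrites the last output entry on every merge) by a
-- two-level run-finding loop that emits each merged group once; objective: alternative.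
-- Both Pythons mutate the first element of each multi-element run of `spans` in place
-- identically; the equivalence proved here is about the RETURN value.

-- shared indexing shorthands: spans[i][0][0] and spans[i][0][1] (defaults never hit inside Pre_)
def pvStart (spans : List (List (Int × Int))) (i : Nat) : Int := ((spans.getD i []).getD 0 (0, 0)).1
def pvEnd (spans : List (List (Int × Int))) (i : Nat) : Int := ((spans.getD i []).getD 0 (0, 0)).2

-- ===== PORT A =====
-- loop body of A; accumulators are kept reversed (cons = append, head = [-1])
def aStep (words : List String) (spans : List (List (Int × Int)))
    (acc : List String × List (List (Int × Int))) (i : Nat) :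
    List String × List (List (Int × Int)) :=
  match acc.2 with
  | [] => (words.getD i "" :: acc.1, spans.getD i [] :: acc.2)
  | last :: rest =>
    if pvStart spans i = (last.getD 0 (0, 0)).2 + 1 then
      ((acc.1.headD "" ++ " " ++ words.getD i "") :: acc.1.tail,
       (((last.getD 0 (0, 0)).1, pvEnd spans i) :: last.tail) :: rest)
    else (words.getD i "" :: acc.1, spans.getD i [] :: acc.2)

def simple_concatenation (words : List String) (spans : List (List (Int × Int))) :
    List String × (List (List (Int × Int))) :=
  let r := (List.range words.length).foldl (aStep words spans) ([], [])
  (r.1.reverse, r.2.reverse)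

-- ===== PORT B =====
-- B's inner while loop: the end of the contiguous run scanning from index j
def findRunEnd (spans : List (List (Int × Int))) (n j : Nat) : Nat :=
  if _h : j < n then
    if pvStart spans j = pvEnd spans (j - 1) + 1 then findRunEnd spans n (j + 1) else j
  else j
termination_by n - j

-- needed by bLoop's termination proof
theorem le_findRunEnd (spans : List (List (Int × Int))) (n j : Nat) :
    j ≤ findRunEnd spans n j := by
  induction j using findRunEnd.induct spans n with
  | case1 j hj hc ih => rw [findRunEnd, dif_pos hj, if_pos hc]; omega
  | case2 j hj hc => rw [findRunEnd, dif_pos hj, if_neg hc]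
  | case3 j hj => rw [findRunEnd, dif_neg hj]

-- B's outer while loop (k is the current run start)
def bLoop (words : List String) (spans : List (List (Int × Int))) (n k : Nat) :
    List String × List (List (Int × Int)) :=
  if _h : k < n then
    let j := findRunEnd spans n (k + 1)
    let sk := spans.getD k []
    let merged :=
      if 1 < j - k then ((sk.getD 0 (0, 0)).1, pvEnd spans (j - 1)) :: sk.tail else sk
    let rest := bLoop words spans n j
    (PySem.Str.join " " ((words.drop k).take (j - k)) :: rest.1, merged :: rest.2)
  else ([], [])
termination_by n - k
decreasing_by
  have := le_findRunEnd spans n (k + 1); omega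

def simple_concatenation_alt (words : List String) (spans : List (List (Int × Int))) :
    List String × (List (List (Int × Int))) :=
  bLoop words spans words.length 0

-- ===== PRECONDITION & SPEC =====
-- Pre_ excludes exactly the inputs on which the Python raises IndexError: spans shorter
-- than words, or (when at least two words exist) an empty spans[i] among the first len(words).
def Pre_simple_concatenation (words : List String) (spans : List (List (Int × Int))) : Prop :=
  words.length ≤ spans.length ∧
    (1 < words.length → ∀ i < words.length, spans.getD i [] ≠ [])
instance (words : List String) (spans : List (List (Int × Int))) :
    Decidable (Pre_simple_concatenation words spans) := by
  unfold Pre_simple_concatenation; infer_instance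

def pvWitness_simple_concatenation : List String × (List (List (Int × Int))) :=
  (["ab", "cd", "e"], [[(0, 2)], [(3, 5)], [(9, 9)]])

def Spec_simple_concatenation (words : List String) (spans : List (List (Int × Int))) (out : List String × (List (List (Int × Int)))) : Prop := out = simple_concatenation_alt words spans
instance (words : List String) (spans : List (List (Int × Int))) (out : List String × (List (List (Int × Int)))) : Decidable (Spec_simple_concatenation words spans out) := by unfold Spec_simple_concatenation; infer_instance

-- ===== CLAIM (what is proved, stated in full; the proofs are below) =====
def Claim_equal_simple_concatenation : Prop := ∀ (words : List String) (spans : List (List (Int × Int))), Dom_simple_concatenation words spans → Pre_simple_concatenation words spans → Spec_simple_concatenation words spans (simple_concatenation words spans)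

-- ===== LEMMAS AND PROOFS =====

theorem findRunEnd_le (spans : List (List (Int × Int))) (n j : Nat) (h : j ≤ n) :
    findRunEnd spans n j ≤ n := by
  induction j using findRunEnd.induct spans n with
  | case1 j hj hc ih => rw [findRunEnd, dif_pos hj, if_pos hc]; exact ih (by omega)
  | case2 j hj hc => rw [findRunEnd, dif_pos hj, if_neg hc]; omega
  | case3 j hj => rw [findRunEnd, dif_neg hj]; omega

theorem findRunEnd_run (spans : List (List (Int × Int))) (n j : Nat) :
    ∀ i, j ≤ i → i < findRunEnd spans n j →
      pvStart spans i = pvEnd spans (i - 1) + 1 := by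
  induction j using findRunEnd.induct spans n with
  | case1 j hj hc ih =>
    intro i h1 h2
    rw [findRunEnd, dif_pos hj, if_pos hc] at h2
    rcases Nat.eq_or_lt_of_le h1 with rfl | h1'
    · exact hc
    · exact ih i h1' h2
  | case2 j hj hc => intro i h1 h2; rw [findRunEnd, dif_pos hj, if_neg hc] at h2; omega
  | case3 j hj => intro i h1 h2; rw [findRunEnd, dif_neg hj] at h2; omega

theorem findRunEnd_stop (spans : List (List (Int × Int))) (n j : Nat)
    (h : findRunEnd spans n j < n) :
    ¬ pvStart spans (findRunEnd spans n j) =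
      pvEnd spans (findRunEnd spans n j - 1) + 1 := by
  induction j using findRunEnd.induct spans n with
  | case1 j hj hc ih => rw [findRunEnd, dif_pos hj, if_pos hc] at h ⊢; exact ih h
  | case2 j hj hc => rw [findRunEnd, dif_pos hj, if_neg hc] at h ⊢; exact hc
  | case3 j hj => rw [findRunEnd, dif_neg hj] at h; omega

-- the word accumulated by A over a run tail
theorem join_foldl (l : List String) : ∀ (w0 : String),
    l.foldl (fun s w => s ++ " " ++ w) w0 = PySem.Str.join " " (w0 :: l) := by
  induction l with
  | nil =>
    intro w0
    apply String.toList_inj.mp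
    rw [List.foldl_nil, PySem.Str.toList_join, List.map_cons, List.map_nil,
      PySem.Chars.join_singleton]
  | cons w t ih =>
    intro w0
    rw [List.foldl_cons, ih]
    apply String.toList_inj.mp
    rw [PySem.Str.toList_join, PySem.Str.toList_join]
    cases t with
    | nil =>
      simp only [List.map_cons, List.map_nil]
      rw [PySem.Chars.join_singleton, PySem.Chars.join_cons_cons, PySem.Chars.join_singleton]
      simp
    | cons x t =>
      simp only [List.map_cons]
      rw [PySem.Chars.join_cons_cons, PySem.Chars.join_cons_cons, PySem.Chars.join_cons_cons]
      simp

-- a foldl over indices equals the foldl over the corresponding slice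
theorem fold_slice (words : List String) : ∀ (cnt a : Nat) (w0 : String),
    a + cnt ≤ words.length →
    (List.range' a cnt).foldl (fun s i => s ++ " " ++ words.getD i "") w0 =
      ((words.drop a).take cnt).foldl (fun s w => s ++ " " ++ w) w0 := by
  intro cnt
  induction cnt with
  | zero => intro a w0 _; simp
  | succ c ih =>
    intro a w0 h
    have ha : a < words.length := by omega
    rw [List.range'_succ, List.foldl_cons, ih (a + 1) _ (by omega),
      List.drop_eq_getElem_cons ha, List.take_succ_cons,
      List.foldl_cons, List.getD_eq_getElem words "" ha]

-- A's fold across the interior of one contiguous run merges everything into the head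
theorem run_fold (words : List String) (spans : List (List (Int × Int))) :
    ∀ (cnt a : Nat) (w0 : String) (l : List (Int × Int))
      (nw : List String) (ns : List (List (Int × Int))),
      (∀ i, a ≤ i → i < a + cnt → pvStart spans i = pvEnd spans (i - 1) + 1) →
      (l.getD 0 (0, 0)).2 = pvEnd spans (a - 1) →
      (List.range' a cnt).foldl (aStep words spans) (w0 :: nw, l :: ns) =
        ((List.range' a cnt).foldl (fun s i => s ++ " " ++ words.getD i "") w0 :: nw,
         (if cnt = 0 then l
          else ((l.getD 0 (0, 0)).1, pvEnd spans (a + cnt - 1)) :: l.tail) :: ns) := by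
  intro cnt
  induction cnt with
  | zero => intro a w0 l nw ns _ _; simp
  | succ c ih =>
    intro a w0 l nw ns hrun hl
    have ha : 0 < a + (c + 1) := by omega
    rw [List.range'_succ, List.foldl_cons, List.foldl_cons]
    have hstep : aStep words spans (w0 :: nw, l :: ns) a =
        ((w0 ++ " " ++ words.getD a "") :: nw,
         (((l.getD 0 (0, 0)).1, pvEnd spans a) :: l.tail) :: ns) := by
      have hc : pvStart spans a = (l.getD 0 (0, 0)).2 + 1 := by
        rw [hl]; exact hrun a le_rfl (by omega)
      simp [aStep, hc]
    rw [hstep, ih (a + 1) _ _ nw ns (fun i h1 h2 => hrun i (by omega) (by omega)) (by simp)]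
    rcases Nat.eq_zero_or_pos c with rfl | hc0
    · rw [if_pos rfl, if_neg (by omega)]
      have e0 : a + (0 + 1) - 1 = a := by omega
      rw [e0]
    · rw [if_neg (by omega), if_neg (by omega),
        show a + 1 + c - 1 = a + (c + 1) - 1 by omega]
      rfl

-- the main correspondence: A's remaining fold from a run boundary equals B's loop output
theorem main_fold (words : List String) (spans : List (List (Int × Int))) (n : Nat)
    (hn : n ≤ words.length) :
    ∀ (fuel k : Nat), n - k ≤ fuel →
      ∀ (nw : List String) (ns : List (List (Int × Int))),
        (k < n → ∀ l ls, ns = l :: ls → pvStart spans k ≠ (l.getD 0 (0, 0)).2 + 1) →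
        (List.range' k (n - k)).foldl (aStep words spans) (nw, ns) =
          ((bLoop words spans n k).1.reverse ++ nw,
           (bLoop words spans n k).2.reverse ++ ns) := by
  intro fuel
  induction fuel with
  | zero =>
    intro k hk nw ns _
    have h1 : n - k = 0 := by omega
    have h2 : ¬ k < n := by omega
    rw [h1, bLoop, dif_neg h2]
    simp
  | succ f ih =>
    intro k hk nw ns hpush
    by_cases h : k < n
    · set j := findRunEnd spans n (k + 1) with hj
      have hj1 : k + 1 ≤ j := le_findRunEnd spans n (k + 1)
      have hj2 : j ≤ n := findRunEnd_le spans n (k + 1) (by omega)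
      -- split the index range: k, then the run interior, then the rest
      have hsplit : List.range' k (n - k) =
          k :: (List.range' (k + 1) (j - (k + 1)) ++ List.range' j (n - j)) := by
        have e1 : n - k = (j - (k + 1)) + (n - j) + 1 := by omega
        have e2 : List.range' (k + 1) (j - (k + 1)) ++
            List.range' (k + 1 + 1 * (j - (k + 1))) (n - j) =
            List.range' (k + 1) (j - (k + 1) + (n - j)) := List.range'_append ..
        rw [show k + 1 + 1 * (j - (k + 1)) = j by omega] at e2
        rw [e1, List.range'_succ, e2]
      rw [hsplit, List.foldl_cons, List.foldl_append]
      -- the step at k pushes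
      have hstep : aStep words spans (nw, ns) k =
          (words.getD k "" :: nw, spans.getD k [] :: ns) := by
        cases ns with
        | nil => rfl
        | cons l ls =>
          have hne := hpush h l ls rfl
          simp only [aStep]
          rw [if_neg hne]
      rw [hstep,
        run_fold words spans (j - (k + 1)) (k + 1) _ _ nw ns
          (fun i h1 h2 => findRunEnd_run spans n (k + 1) i h1 (by omega))
          (by rw [Nat.add_sub_cancel]; rfl)]
      -- the tail: apply the induction hypothesis at j
      set merged' : List (Int × Int) :=
        if j - (k + 1) = 0 then spans.getD k []
        else (((spans.getD k []).getD 0 (0, 0)).1, pvEnd spans (k + 1 + (j - (k + 1)) - 1))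
          :: (spans.getD k []).tail with hm'
      have hmend : (merged'.getD 0 (0, 0)).2 = pvEnd spans (j - 1) := by
        rw [hm']
        rcases Nat.eq_zero_or_pos (j - (k + 1)) with h0 | h0
        · rw [if_pos h0]
          have : j - 1 = k := by omega
          rw [this]; rfl
        · rw [if_neg (by omega), show k + 1 + (j - (k + 1)) - 1 = j - 1 by omega]
          rfl
      have hrest := ih j (by omega)
        ((List.range' (k + 1) (j - (k + 1))).foldl
          (fun s i => s ++ " " ++ words.getD i "") (words.getD k "") :: nw)
        (merged' :: ns)
        (by
          intro hjn l ls hl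
          injection hl with hl1 hl2
          rw [← hl1, hmend]
          exact findRunEnd_stop spans n (k + 1) hjn)
      rw [hrest]
      -- unfold bLoop once at k (LHS only, so the inner bLoop at j stays folded)
      have hbk : bLoop words spans n k =
          (PySem.Str.join " " ((words.drop k).take (j - k)) :: (bLoop words spans n j).1,
           (if 1 < j - k then
              (((spans.getD k []).getD 0 (0, 0)).1, pvEnd spans (j - 1)) ::
                (spans.getD k []).tail
            else spans.getD k []) :: (bLoop words spans n j).2) := by
        conv_lhs => rw [bLoop]
        rw [dif_pos h]
      -- reconcile B's run word and merged span with A's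
      have hW : PySem.Str.join " " ((words.drop k).take (j - k)) =
          (List.range' (k + 1) (j - (k + 1))).foldl
            (fun s i => s ++ " " ++ words.getD i "") (words.getD k "") := by
        rw [fold_slice words (j - (k + 1)) (k + 1) _ (by omega), join_foldl]
        congr 1
        rw [List.drop_eq_getElem_cons (by omega : k < words.length),
          show j - k = (j - (k + 1)) + 1 by omega, List.take_succ_cons,
          List.getD_eq_getElem words "" (by omega)]
      have hM : (if 1 < j - k then
            (((spans.getD k []).getD 0 (0, 0)).1, pvEnd spans (j - 1)) ::
              (spans.getD k []).tail
          else spans.getD k []) = merged' := by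
        rw [hm']
        rcases Nat.eq_zero_or_pos (j - (k + 1)) with h0 | h0
        · rw [if_neg (show ¬ 1 < j - k by omega), if_pos h0]
        · rw [if_pos (show 1 < j - k by omega), if_neg (show ¬ j - (k + 1) = 0 by omega),
            show k + 1 + (j - (k + 1)) - 1 = j - 1 by omega]
      rw [hW, hM] at hbk
      rw [hbk]
      simp [List.append_assoc]
    · have h1 : n - k = 0 := by omega
      rw [h1, bLoop, dif_neg h]
      simp

-- ===== VERDICT (by name: the statement is the Claim_ definition above) =====
theorem simple_concatenation_spec : Claim_equal_simple_concatenation := by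
  intro words spans _dom _pre
  unfold Spec_simple_concatenation simple_concatenation simple_concatenation_alt
  have h := main_fold words spans words.length le_rfl words.length 0 (by omega) [] []
    (by intro _ l ls h; cases h)
  simp only [Nat.sub_zero] at h
  rw [List.range_eq_range', h]
  simp
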